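-- pv_equiv track=rewrite | github.com/jvanegmond/oac_2023 | day2/solve2.py | max_each
-- ===== SOURCE A (Python) =====
-- def max_each(grabs):
--     result = []
--     for grab in grabs:
--         for color in grab:
--             in_result = [(x, y) for x, y in result if y == color[1]]
--             if len(in_result) == 0:
--                 result.append(color)
--             elif color[0] > in_result[0][0]:
--                 result[result.index(in_result[0])] = color # replace that color in result with current count
--     return result
-- ===== SOURCE B (Python) =====
-- def max_each(grabs):
--     flat = [color for grab in grabs for color in grab]
--     seen = []
--     for _, name in flat:
--         if name not in seen:
--             seen.append(name)
--     return [(max(c for c, n in flat if n == name), name) for name in seen]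
-- ===== Notes on version B (the rewrite author's own statement) =====
-- stated objective: alternative
-- what changed: Replaces the streaming scan-and-replace on a single running result list with a group-by design: flatten all grabs, collect the distinct names in first-seen order, then for each name compute max() over all of its counts in a separate per-name pass; no running-max state is maintained at all.
import Mathlib
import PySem

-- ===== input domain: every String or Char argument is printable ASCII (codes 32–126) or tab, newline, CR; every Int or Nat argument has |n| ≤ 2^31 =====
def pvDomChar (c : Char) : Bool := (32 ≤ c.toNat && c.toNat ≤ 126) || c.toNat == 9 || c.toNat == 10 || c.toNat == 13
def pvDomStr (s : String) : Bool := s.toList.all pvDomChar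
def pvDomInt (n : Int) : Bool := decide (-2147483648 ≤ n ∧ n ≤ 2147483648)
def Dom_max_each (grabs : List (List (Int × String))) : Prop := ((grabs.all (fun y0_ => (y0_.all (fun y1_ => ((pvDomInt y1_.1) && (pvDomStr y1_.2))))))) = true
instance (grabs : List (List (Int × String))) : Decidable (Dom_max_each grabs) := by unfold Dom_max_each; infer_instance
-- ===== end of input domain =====

-- B replaces A's streaming scan-and-replace of a running result list with a group-by design:
-- flatten, collect distinct names in first-seen order, then an independent max() pass per name (objective: alternative).

-- ===== PORT A =====
-- one iteration of A's inner loop body over the running result list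
def maxEachStepA (result : List (Int × String)) (color : Int × String) : List (Int × String) :=
  let in_result := result.filter (fun p => p.2 == color.2)
  if in_result.length = 0 then result ++ [color]
  else if color.1 > (PySem.List.pyGetD in_result 0 ((0 : Int), "")).1 then
    match PySem.List.index? result (PySem.List.pyGetD in_result 0 ((0 : Int), "")) with
    | some i => result.set i color       -- result[result.index(in_result[0])] = color
    | none => result                      -- unreachable: in_result[0] is an element of result
  else result

def max_each (grabs : List (List (Int × String))) : List (Int × String) :=
  grabs.foldl (fun result grab => grab.foldl maxEachStepA result) []

-- ===== PORT B =====
-- the first-seen-order distinct-names loop of Source B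
def seenFold (flat : List (Int × String)) : List String :=
  flat.foldl (fun seen c => if c.2 ∈ seen then seen else seen ++ [c.2]) []

-- Python max(...) on a list of ints; the none branch is unreachable (called on a nonempty filter)
def maxOf (xs : List Int) : Int :=
  match PySem.List.max? xs (fun y => y) with
  | some m => m
  | none => 0

-- max(c for c, n in flat if n == name)
def bestOf (flat : List (Int × String)) (name : String) : Int :=
  maxOf ((flat.filter (fun p => p.2 == name)).map (fun p => p.1))

def max_each_alt (grabs : List (List (Int × String))) : List (Int × String) :=
  let flat := grabs.flatten
  (seenFold flat).map (fun name => (bestOf flat name, name))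

-- ===== PRECONDITION & SPEC =====
def Spec_max_each (grabs : List (List (Int × String))) (out : List (Int × String)) : Prop := out = max_each_alt grabs
instance (grabs : List (List (Int × String))) (out : List (Int × String)) : Decidable (Spec_max_each grabs out) := by unfold Spec_max_each; infer_instance

-- ===== CLAIM (what is proved, stated in full; the proofs are below) =====
def Claim_equal_max_each : Prop := ∀ (grabs : List (List (Int × String))), Dom_max_each grabs → Spec_max_each grabs (max_each grabs)

-- ===== LEMMAS AND PROOFS =====

-- filtering B's reconstruction by name picks exactly the (unique) entry for that name
lemma filter_map_snd_eq (g : String → Int) (order : List String) (hnd : order.Nodup) (nm : String) :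
    (order.map (fun n => (g n, n))).filter (fun p => p.2 == nm)
      = if nm ∈ order then [(g nm, nm)] else [] := by
  induction order with
  | nil => simp
  | cons a t ih =>
    simp only [List.nodup_cons] at hnd
    by_cases h : a = nm
    · subst h
      simp [ih hnd.2, hnd.1]
    · simp [h, Ne.symm h, List.mem_cons]
      exact ih hnd.2

-- replacing via list.index = pointwise update of the value function
lemma set_index_replace (g : String → Int) (order : List String) (hnd : order.Nodup)
    (nm : String) (hm : nm ∈ order) (cnt : Int) :
    (match PySem.List.index? (order.map (fun n => (g n, n))) (g nm, nm) with
     | some i => (order.map (fun n => (g n, n))).set i (cnt, nm)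
     | none => order.map (fun n => (g n, n)))
      = order.map (fun n => (if n = nm then cnt else g n, n)) := by
  induction order with
  | nil => cases hm
  | cons a t ih =>
    simp only [List.nodup_cons] at hnd
    by_cases h : a = nm
    · subst h
      rw [List.map_cons, PySem.List.index?_cons_self]
      show (cnt, a) :: t.map (fun n => (g n, n)) = _
      simp only [List.map_cons]
      refine congrArg _ (List.map_congr_left fun n hn => ?_)
      have : n ≠ a := fun e => hnd.1 (e ▸ hn)
      simp [this]
    · have hm' : nm ∈ t := by
        rcases List.mem_cons.mp hm with h' | h'
        · exact absurd h'.symm h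
        · exact h'
      have hne : (g a, a) ≠ (g nm, nm) := fun e => h (congrArg Prod.snd e)
      rw [List.map_cons, PySem.List.index?_cons_of_ne _ hne]
      cases hidx : PySem.List.index? (t.map (fun n => (g n, n))) (g nm, nm) with
      | none =>
        exact absurd (List.mem_map.mpr ⟨nm, hm', rfl⟩) (PySem.List.index?_eq_none_iff _ _ |>.mp hidx)
      | some i =>
        have hih := ih hnd.2 hm'
        rw [hidx] at hih
        simp only [Option.map_some, List.set_cons_succ, List.map_cons]
        rw [if_neg h]
        exact congrArg _ (by simpa using hih)

lemma mem_seenFold_aux (n : String) (flat : List (Int × String)) :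
    ∀ acc, n ∈ flat.foldl (fun seen c => if c.2 ∈ seen then seen else seen ++ [c.2]) acc
      ↔ n ∈ acc ∨ n ∈ flat.map (fun p => p.2) := by
  induction flat with
  | nil => intro acc; simp
  | cons c t ih =>
    intro acc
    simp only [List.foldl_cons, List.map_cons, List.mem_cons]
    by_cases h : c.2 ∈ acc
    · rw [if_pos h, ih]
      constructor
      · rintro (h' | h') <;> tauto
      · rintro (h' | h' | h')
        · tauto
        · exact Or.inl (h' ▸ h)
        · tauto
    · rw [if_neg h, ih]
      simp only [List.mem_append, List.mem_singleton]
      tauto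

lemma filter_ne_nil_iff (flat : List (Int × String)) (n : String) :
    flat.filter (fun p => p.2 == n) ≠ [] ↔ n ∈ flat.map (fun p => p.2) := by
  rw [Ne, List.filter_eq_nil_iff]
  simp [List.mem_map]

lemma mem_seenFold (n : String) (flat : List (Int × String)) :
    n ∈ seenFold flat ↔ flat.filter (fun p => p.2 == n) ≠ [] := by
  rw [seenFold, mem_seenFold_aux, filter_ne_nil_iff]
  simp

lemma nodup_seenFold_aux (flat : List (Int × String)) :
    ∀ acc : List String, acc.Nodup →
      (flat.foldl (fun seen c => if c.2 ∈ seen then seen else seen ++ [c.2]) acc).Nodup := by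
  induction flat with
  | nil => intro acc h; exact h
  | cons c t ih =>
    intro acc h
    simp only [List.foldl_cons]
    by_cases hm : c.2 ∈ acc
    · rw [if_pos hm]; exact ih acc h
    · rw [if_neg hm]
      refine ih _ ?_
      simp [List.nodup_append, h]
      exact fun x hx e => hm (e ▸ hx)

lemma nodup_seenFold (flat : List (Int × String)) : (seenFold flat).Nodup :=
  nodup_seenFold_aux flat [] List.nodup_nil

lemma seenFold_append (flat : List (Int × String)) (c : Int × String) :
    seenFold (flat ++ [c]) = if c.2 ∈ seenFold flat then seenFold flat else seenFold flat ++ [c.2] := by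
  simp [seenFold, List.foldl_append]

lemma bestOf_append_ne (flat : List (Int × String)) (cnt : Int) (nm n : String) (h : n ≠ nm) :
    bestOf (flat ++ [(cnt, nm)]) n = bestOf flat n := by
  have : (((cnt, nm) : Int × String).2 == n) = false := beq_eq_false_iff_ne.mpr (Ne.symm h)
  simp [bestOf, List.filter_append, this]

lemma bestOf_append_self (flat : List (Int × String)) (cnt : Int) (nm : String) :
    bestOf (flat ++ [(cnt, nm)]) nm
      = if flat.filter (fun p => p.2 == nm) = [] then cnt else max (bestOf flat nm) cnt := by
  simp only [bestOf, List.filter_append, List.filter_cons, List.filter_nil]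
  rw [show (((cnt, nm) : Int × String).2 == nm) = true by simp]
  simp only [if_pos trivial, List.map_append, List.map_cons, List.map_nil]
  cases hf : flat.filter (fun p => p.2 == nm) with
  | nil => simp [maxOf, PySem.List.max?_id_cons]
  | cons x xs =>
    simp only [List.map_cons, List.cons_append]
    rw [if_neg (by simp)]
    simp [maxOf, PySem.List.max?_id_cons, List.foldl_append]

-- A's fold over the flattened colors computes B's group-by reconstruction
lemma A_canon (flat : List (Int × String)) :
    flat.foldl maxEachStepA [] = (seenFold flat).map (fun n => (bestOf flat n, n)) := by
  induction flat using List.reverseRecOn with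
  | nil => simp [seenFold]
  | append_singleton l c ih =>
    obtain ⟨cnt, nm⟩ := c
    rw [List.foldl_append, List.foldl_cons, List.foldl_nil, ih, seenFold_append]
    have hnd := nodup_seenFold l
    have hfil := filter_map_snd_eq (bestOf l) (seenFold l) hnd nm
    by_cases hm : nm ∈ seenFold l
    · have hlf : l.filter (fun p => p.2 == nm) ≠ [] := (mem_seenFold nm l).mp hm
      rw [if_pos hm] at hfil ⊢
      have hbs : bestOf (l ++ [(cnt, nm)]) nm = max (bestOf l nm) cnt := by
        rw [bestOf_append_self, if_neg hlf]
      by_cases hgt : cnt > bestOf l nm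
      · have hA : maxEachStepA ((seenFold l).map (fun n => (bestOf l n, n))) (cnt, nm)
            = (seenFold l).map (fun n => (if n = nm then cnt else bestOf l n, n)) := by
          simp only [maxEachStepA, hfil, PySem.List.pyGetD_zero_cons,
            List.length_cons, List.length_nil]
          rw [if_neg (by omega), if_pos hgt]
          exact set_index_replace (bestOf l) (seenFold l) hnd nm hm cnt
        rw [hA]
        refine List.map_congr_left fun n _ => ?_
        by_cases h : n = nm
        · subst h; rw [if_pos rfl, hbs, max_eq_right (le_of_lt hgt)]
        · rw [if_neg h, bestOf_append_ne _ _ _ _ h]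
      · have hA : maxEachStepA ((seenFold l).map (fun n => (bestOf l n, n))) (cnt, nm)
            = (seenFold l).map (fun n => (bestOf l n, n)) := by
          simp only [maxEachStepA, hfil, PySem.List.pyGetD_zero_cons,
            List.length_cons, List.length_nil]
          rw [if_neg (by omega), if_neg hgt]
        rw [hA]
        refine List.map_congr_left fun n _ => ?_
        by_cases h : n = nm
        · subst h; rw [hbs, max_eq_left (not_lt.mp hgt)]
        · rw [bestOf_append_ne _ _ _ _ h]
    · have hlf : l.filter (fun p => p.2 == nm) = [] := by
        by_contra h; exact hm ((mem_seenFold nm l).mpr h)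
      rw [if_neg hm] at hfil ⊢
      have hA : maxEachStepA ((seenFold l).map (fun n => (bestOf l n, n))) (cnt, nm)
          = (seenFold l).map (fun n => (bestOf l n, n)) ++ [(cnt, nm)] := by
        simp [maxEachStepA, hfil]
      rw [hA, List.map_append, List.map_cons, List.map_nil]
      congr 1
      · refine List.map_congr_left fun n hn => ?_
        have h : n ≠ nm := fun e => hm (e ▸ hn)
        rw [bestOf_append_ne _ _ _ _ h]
      · rw [bestOf_append_self, if_pos hlf]

theorem max_each_eq (grabs : List (List (Int × String))) : max_each grabs = max_each_alt grabs := by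
  have hA : max_each grabs = grabs.flatten.foldl maxEachStepA [] := by
    simp [max_each, List.foldl_flatten]
  rw [hA, A_canon]
  rfl

-- ===== VERDICT (by name: the statement is the Claim_ definition above) =====
theorem max_each_spec : Claim_equal_max_each := by
  intro grabs _
  unfold Spec_max_each
  exact max_each_eq grabs
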